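-- pv_equiv track=rewrite | github.com/miliar/Code_Jam_Webscraper | solutions_python/solutions_year16_round1_nr1/1918.py | calculate_last_word
-- ===== SOURCE A (Python) =====
-- def calculate_last_word(word):
--     last_word = ''
--     for c in word:
--         if len(last_word) == 0:
--             last_word += c
--         else:
--             a = last_word + c
--             b = c + last_word
--
--             if a > b:
--                 last_word = a
--             else:
--                 last_word = b
--     return last_word
-- ===== SOURCE B (Python) =====
-- def calculate_last_word(word):
--     cur = None
--     front = []
--     back = []
--     for c in word:
--         if cur is None or c >= cur:
--             front.append(c)
--             cur = c
--         else:
--             back.append(c)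
--     return ''.join(reversed(front)) + ''.join(back)
-- ===== Notes on version B (the rewrite author's own statement) =====
-- stated objective: faster
-- what changed: Replaced A's greedy that concatenates and lexicographically compares the whole accumulated string with each char (quadratic) by a single pass that keeps only a running maximum char and two lists front/back, returning reversed(front)+back.
import Mathlib
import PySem

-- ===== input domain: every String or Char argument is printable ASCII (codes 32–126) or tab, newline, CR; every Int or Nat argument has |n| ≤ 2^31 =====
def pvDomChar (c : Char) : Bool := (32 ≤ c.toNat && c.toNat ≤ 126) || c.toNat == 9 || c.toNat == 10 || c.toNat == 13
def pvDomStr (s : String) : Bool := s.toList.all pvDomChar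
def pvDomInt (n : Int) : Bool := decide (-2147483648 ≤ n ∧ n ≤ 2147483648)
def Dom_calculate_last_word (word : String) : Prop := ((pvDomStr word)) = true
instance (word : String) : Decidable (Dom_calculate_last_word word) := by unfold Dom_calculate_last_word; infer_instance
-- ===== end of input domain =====

-- B replaces A's quadratic compare-two-concatenations greedy by a single pass keeping a
-- running maximum char and two lists (front/back); objective: simpler/faster.

-- ===== PORT A =====
-- A's greedy step on the accumulated word (strings ported through List Char; Python's
-- lexicographic '>' on str is List.lt on the char lists, exact on the ASCII domain)
def calcA_step (last_word : List Char) (c : Char) : List Char :=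
  if last_word.length = 0 then last_word ++ [c]
  else
    let a := last_word ++ [c]
    let b := c :: last_word
    if b < a then a else b

def calculate_last_word (word : String) : String :=
  String.ofList (word.toList.foldl calcA_step [])

-- ===== PORT B =====
-- B's step: state (cur, front, back); c goes to front (and becomes cur) iff cur is none or c ≥ cur
def calcB_step (st : Option Char × List Char × List Char) (c : Char) :
    Option Char × List Char × List Char :=
  match st with
  | (none, front, back) => (some c, front ++ [c], back)
  | (some m, front, back) =>
      if m ≤ c then (some c, front ++ [c], back) else (some m, front, back ++ [c])

def calculate_last_word_alt (word : String) : String :=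
  let st := word.toList.foldl calcB_step (none, [], [])
  String.ofList (st.2.1.reverse ++ st.2.2)

-- ===== PRECONDITION & SPEC =====
def Spec_calculate_last_word (word : String) (out : String) : Prop := out = calculate_last_word_alt word
instance (word : String) (out : String) : Decidable (Spec_calculate_last_word word out) := by unfold Spec_calculate_last_word; infer_instance

-- ===== CLAIM (what is proved, stated in full; the proofs are below) =====
def Claim_equal_calculate_last_word : Prop := ∀ (word : String), Dom_calculate_last_word word → Spec_calculate_last_word word (calculate_last_word word)

-- ===== LEMMAS AND PROOFS =====

-- lex: no list of chars all ≤ c makes c :: l < l ++ [c]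
theorem not_cons_lt_append (c : Char) (l : List Char) (h : ∀ x ∈ l, x ≤ c) :
    ¬ (c :: l < l ++ [c]) := by
  induction l with
  | nil => simp
  | cons x l ih =>
      intro hlt
      have hx : x ≤ c := h x (by simp)
      rcases List.cons_lt_cons_iff.mp hlt with h1 | ⟨he, h2⟩
      · exact absurd h1 (not_lt.mpr hx)
      · subst he
        exact ih (fun y hy => h y (by simp [hy])) h2

-- lex: a smaller head decides
theorem cons_lt_of_head_lt (c m : Char) (l r : List Char) (h : c < m) :
    c :: l < m :: r := List.cons_lt_cons_iff.mpr (Or.inl h)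

-- main invariant: A's fold equals B's fold under the running representation
theorem inv (cs : List Char) :
    ∀ (front back : List Char) (m : Char),
      front.getLast? = some m →
      (∀ x ∈ front.reverse ++ back, x ≤ m) →
      cs.foldl calcA_step (front.reverse ++ back) =
        (let st := cs.foldl calcB_step (some m, front, back)
         st.2.1.reverse ++ st.2.2) := by
  induction cs with
  | nil => intro front back m _ _; simp
  | cons c cs ih =>
      intro front back m hlast hle
      obtain ⟨f', hf⟩ : ∃ f', front = f' ++ [m] := by
        rcases List.getLast?_eq_some_iff.mp hlast with ⟨f', hf⟩
        exact ⟨f', hf⟩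
      have hne : front.reverse ++ back ≠ [] := by simp [hf]
      by_cases hmc : m ≤ c
      · -- c goes to front in B; A prepends
        have hstepB : calcB_step (some m, front, back) c = (some c, front ++ [c], back) := by
          simp [calcB_step, hmc]
        have hallc : ∀ x ∈ front.reverse ++ back, x ≤ c := fun x hx => le_trans (hle x hx) hmc
        have hstepA : calcA_step (front.reverse ++ back) c = c :: (front.reverse ++ back) := by
          unfold calcA_step
          rw [if_neg (by simpa using hne)]
          simp only []
          rw [if_neg (not_cons_lt_append c _ hallc)]
        have hrep : c :: (front.reverse ++ back) = (front ++ [c]).reverse ++ back := by simp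
        have := ih (front ++ [c]) back c (by simp)
          (by
            intro x hx
            rw [← hrep] at hx
            rcases List.mem_cons.mp hx with h | h
            · exact le_of_eq h
            · exact hallc x h)
        simp only [List.foldl_cons, hstepA, hstepB, hrep]
        exact this
      · -- c < m: A appends, B sends c to back
        have hcm : c < m := lt_of_not_ge hmc
        have hstepB : calcB_step (some m, front, back) c = (some m, front, back ++ [c]) := by
          simp [calcB_step, hmc]
        have hhead : front.reverse ++ back = m :: (f'.reverse ++ back) := by
          simp [hf]
        have hstepA : calcA_step (front.reverse ++ back) c = (front.reverse ++ back) ++ [c] := by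
          unfold calcA_step
          rw [if_neg (by simpa using hne)]
          simp only []
          rw [if_pos]
          rw [hhead]
          exact cons_lt_of_head_lt c m _ _ hcm
        have hrep : (front.reverse ++ back) ++ [c] = front.reverse ++ (back ++ [c]) := by simp
        have := ih front (back ++ [c]) m hlast
          (by
            intro x hx
            rw [← hrep] at hx
            rcases List.mem_append.mp hx with h | h
            · exact hle x h
            · simp at h; subst h; exact le_of_lt hcm)
        simp only [List.foldl_cons, hstepA, hstepB, hrep]
        exact this

-- ===== VERDICT (by name: the statement is the Claim_ definition above) =====
theorem calculate_last_word_spec : Claim_equal_calculate_last_word := by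
  intro word _
  unfold Spec_calculate_last_word calculate_last_word calculate_last_word_alt
  cases hw : word.toList with
  | nil => simp
  | cons c cs =>
      have h1 : calcA_step [] c = [c] := by simp [calcA_step]
      have h2 : calcB_step (none, [], []) c = (some c, [c], []) := rfl
      have h3 : ([c] : List Char) = ([c].reverse ++ []) := by simp
      simp only [List.foldl_cons, h1, h2]
      rw [h3, inv cs [c] [] c (by simp) (by intro x hx; simp at hx; exact le_of_eq hx)]
      simp
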